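-- pv_equiv track=rewrite | github.com/sofia285/FP | study.py | num_para_seq_cod
-- ===== SOURCE A (Python) =====
-- def num_para_seq_cod(num):
--     cod = ()
--     while num>0:
--         if num%10>=0 and num%10<8 and (num%10)%2==0:
--             cod = (((num%10)+2),) + cod
--         if num%10>=0 and num%10==8 and (num%10)%2==0:
--             cod = (0,) + cod
--         if num%10>=0 and num%10!=1 and (num%10)%2!=0:
--             cod = (((num%10)-2),) + cod
--         if num%10>=0 and num%10==1 and (num%10)%2!=0:
--             cod = (9,) + cod
--         num = num//10
--     return cod
-- ===== SOURCE B (Python) =====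
-- TABLE = (2, 9, 4, 1, 6, 3, 8, 5, 0, 7)
--
-- def num_para_seq_cod(num):
--     if num <= 0:
--         return ()
--     return num_para_seq_cod(num // 10) + (TABLE[num % 10],)
-- ===== Notes on version B (the rewrite author's own statement) =====
-- stated objective: simpler
-- what changed: Replaces the iterative while-loop with four overlapping parity/boundary branch conditions and tuple prepending by a short MSB-first recursion that maps each digit through a fixed per-digit lookup table and appends.
import Mathlib
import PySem

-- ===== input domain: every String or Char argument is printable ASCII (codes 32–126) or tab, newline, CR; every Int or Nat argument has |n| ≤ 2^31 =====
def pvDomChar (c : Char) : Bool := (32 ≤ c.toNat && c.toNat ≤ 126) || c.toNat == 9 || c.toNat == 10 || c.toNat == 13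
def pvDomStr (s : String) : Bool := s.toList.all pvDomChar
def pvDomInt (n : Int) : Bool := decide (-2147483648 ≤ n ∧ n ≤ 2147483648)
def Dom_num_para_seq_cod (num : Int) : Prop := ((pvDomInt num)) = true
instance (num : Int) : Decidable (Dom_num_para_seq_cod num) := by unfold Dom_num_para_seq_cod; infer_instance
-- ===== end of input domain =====

-- B replaces A's four-branch while-loop with prepending by an MSB-first recursion over a fixed digit lookup table (objective: simpler).

-- ===== PORT A =====
-- the while loop of A: state = (num, cod); the four ifs run in order, each prepending to cod
def numParaSeqCodLoop (num : Int) (cod : List Int) : List Int :=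
  if h : num > 0 then
    let cod :=
      if PySem.Int.mod num 10 ≥ 0 ∧ PySem.Int.mod num 10 < 8 ∧ PySem.Int.mod (PySem.Int.mod num 10) 2 = 0 then
        (PySem.Int.mod num 10 + 2) :: cod else cod
    let cod :=
      if PySem.Int.mod num 10 ≥ 0 ∧ PySem.Int.mod num 10 = 8 ∧ PySem.Int.mod (PySem.Int.mod num 10) 2 = 0 then
        (0 : Int) :: cod else cod
    let cod :=
      if PySem.Int.mod num 10 ≥ 0 ∧ PySem.Int.mod num 10 ≠ 1 ∧ PySem.Int.mod (PySem.Int.mod num 10) 2 ≠ 0 then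
        (PySem.Int.mod num 10 - 2) :: cod else cod
    let cod :=
      if PySem.Int.mod num 10 ≥ 0 ∧ PySem.Int.mod num 10 = 1 ∧ PySem.Int.mod (PySem.Int.mod num 10) 2 ≠ 0 then
        (9 : Int) :: cod else cod
    numParaSeqCodLoop (PySem.Int.floordiv num 10) cod
  else cod
termination_by num.toNat
decreasing_by
  have := PySem.Int.floordiv_eq_ediv_of_pos (a := num) (b := 10) (by omega)
  omega

def num_para_seq_cod (num : Int) : List Int := numParaSeqCodLoop num []

-- ===== PORT B =====
def pvTable : List Int := [2, 9, 4, 1, 6, 3, 8, 5, 0, 7]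

-- TABLE[num % 10]: the index is always in 0..9, so the pyGetD default is never used
def num_para_seq_cod_alt (num : Int) : List Int :=
  if num ≤ 0 then []
  else num_para_seq_cod_alt (PySem.Int.floordiv num 10) ++
    [PySem.List.pyGetD pvTable (PySem.Int.mod num 10) 0]
termination_by num.toNat
decreasing_by
  have := PySem.Int.floordiv_eq_ediv_of_pos (a := num) (b := 10) (by omega)
  omega

-- ===== PRECONDITION & SPEC =====
def Spec_num_para_seq_cod (num : Int) (out : List Int) : Prop := out = num_para_seq_cod_alt num
instance (num : Int) (out : List Int) : Decidable (Spec_num_para_seq_cod num out) := by unfold Spec_num_para_seq_cod; infer_instance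

-- ===== CLAIM (what is proved, stated in full; the proofs are below) =====
def Claim_equal_num_para_seq_cod : Prop := ∀ (num : Int), Dom_num_para_seq_cod num → Spec_num_para_seq_cod num (num_para_seq_cod num)

-- ===== LEMMAS AND PROOFS =====

-- the accumulator invariant: A's loop prepends exactly B's result
theorem numParaSeqCodLoop_eq (num : Int) (cod : List Int) :
    numParaSeqCodLoop num cod = num_para_seq_cod_alt num ++ cod := by
  by_cases h : num > 0
  · rw [numParaSeqCodLoop, dif_pos h, num_para_seq_cod_alt, if_neg (show ¬ num ≤ 0 by omega)]
    have h0 : (0:Int) < 10 := by decide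
    have hlo := PySem.Int.mod_nonneg num h0
    have hhi := PySem.Int.mod_lt num h0
    have hstep : ∀ c : List Int,
        (if PySem.Int.mod num 10 ≥ 0 ∧ PySem.Int.mod num 10 = 1 ∧ PySem.Int.mod (PySem.Int.mod num 10) 2 ≠ 0 then
          (9 : Int) ::
            (if PySem.Int.mod num 10 ≥ 0 ∧ PySem.Int.mod num 10 ≠ 1 ∧ PySem.Int.mod (PySem.Int.mod num 10) 2 ≠ 0 then
              (PySem.Int.mod num 10 - 2) ::
                (if PySem.Int.mod num 10 ≥ 0 ∧ PySem.Int.mod num 10 = 8 ∧ PySem.Int.mod (PySem.Int.mod num 10) 2 = 0 then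
                  (0 : Int) ::
                    (if PySem.Int.mod num 10 ≥ 0 ∧ PySem.Int.mod num 10 < 8 ∧ PySem.Int.mod (PySem.Int.mod num 10) 2 = 0 then
                      (PySem.Int.mod num 10 + 2) :: c else c)
                 else
                  (if PySem.Int.mod num 10 ≥ 0 ∧ PySem.Int.mod num 10 < 8 ∧ PySem.Int.mod (PySem.Int.mod num 10) 2 = 0 then
                    (PySem.Int.mod num 10 + 2) :: c else c))
             else
              (if PySem.Int.mod num 10 ≥ 0 ∧ PySem.Int.mod num 10 = 8 ∧ PySem.Int.mod (PySem.Int.mod num 10) 2 = 0 then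
                (0 : Int) ::
                  (if PySem.Int.mod num 10 ≥ 0 ∧ PySem.Int.mod num 10 < 8 ∧ PySem.Int.mod (PySem.Int.mod num 10) 2 = 0 then
                    (PySem.Int.mod num 10 + 2) :: c else c)
               else
                (if PySem.Int.mod num 10 ≥ 0 ∧ PySem.Int.mod num 10 < 8 ∧ PySem.Int.mod (PySem.Int.mod num 10) 2 = 0 then
                  (PySem.Int.mod num 10 + 2) :: c else c)))
         else
          (if PySem.Int.mod num 10 ≥ 0 ∧ PySem.Int.mod num 10 ≠ 1 ∧ PySem.Int.mod (PySem.Int.mod num 10) 2 ≠ 0 then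
            (PySem.Int.mod num 10 - 2) ::
              (if PySem.Int.mod num 10 ≥ 0 ∧ PySem.Int.mod num 10 = 8 ∧ PySem.Int.mod (PySem.Int.mod num 10) 2 = 0 then
                (0 : Int) ::
                  (if PySem.Int.mod num 10 ≥ 0 ∧ PySem.Int.mod num 10 < 8 ∧ PySem.Int.mod (PySem.Int.mod num 10) 2 = 0 then
                    (PySem.Int.mod num 10 + 2) :: c else c)
               else
                (if PySem.Int.mod num 10 ≥ 0 ∧ PySem.Int.mod num 10 < 8 ∧ PySem.Int.mod (PySem.Int.mod num 10) 2 = 0 then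
                  (PySem.Int.mod num 10 + 2) :: c else c))
           else
            (if PySem.Int.mod num 10 ≥ 0 ∧ PySem.Int.mod num 10 = 8 ∧ PySem.Int.mod (PySem.Int.mod num 10) 2 = 0 then
              (0 : Int) ::
                (if PySem.Int.mod num 10 ≥ 0 ∧ PySem.Int.mod num 10 < 8 ∧ PySem.Int.mod (PySem.Int.mod num 10) 2 = 0 then
                  (PySem.Int.mod num 10 + 2) :: c else c)
             else
              (if PySem.Int.mod num 10 ≥ 0 ∧ PySem.Int.mod num 10 < 8 ∧ PySem.Int.mod (PySem.Int.mod num 10) 2 = 0 then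
                (PySem.Int.mod num 10 + 2) :: c else c)))) =
        PySem.List.pyGetD pvTable (PySem.Int.mod num 10) 0 :: c := by
      intro c
      interval_cases h : PySem.Int.mod num 10 <;>
        simp [PySem.List.pyGetD, PySem.List.pyIdx?, PySem.List.pyGet?, pvTable]
    simp only [hstep]
    rw [numParaSeqCodLoop_eq (PySem.Int.floordiv num 10)]
    simp
  · rw [numParaSeqCodLoop, dif_neg h, num_para_seq_cod_alt, if_pos (show num ≤ 0 by omega)]
    simp
termination_by num.toNat
decreasing_by
  have := PySem.Int.floordiv_eq_ediv_of_pos (a := num) (b := 10) (by omega)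
  omega

-- ===== VERDICT (by name: the statement is the Claim_ definition above) =====
theorem num_para_seq_cod_spec : Claim_equal_num_para_seq_cod := by
  intro num _
  show num_para_seq_cod num = num_para_seq_cod_alt num
  rw [num_para_seq_cod, numParaSeqCodLoop_eq]
  simp
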